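-- pv_equiv track=rewrite | github.com/during010/TripGenie | model/utils/funcs.py | find_clusters_containing_all_elements
-- ===== SOURCE A (Python) =====
-- def find_clusters_containing_all_elements(A: list, B: list) -> list:
--
--     cluster_indexes = []
--
--     for idx, cluster in enumerate(A):
--         for pointId in B:
--             if pointId in cluster:
--                 cluster_indexes.append(idx)
--                 break
--
--     return cluster_indexes
-- ===== SOURCE B (Python) =====
-- def find_clusters_containing_all_elements(A: list, B: list) -> list:
--     index = {}
--     for idx, cluster in enumerate(A):
--         for pointId in cluster:
--             index.setdefault(pointId, set()).add(idx)
--     hits = set()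
--     for pointId in B:
--         hits |= index.get(pointId, set())
--     return sorted(hits)
-- ===== Notes on version B (the rewrite author's own statement) =====
-- stated objective: faster
-- what changed: Replaces the per-cluster membership scan over B with a precomputed inverted index (element -> set of cluster indices) built in one pass, then unions the index entries for B's elements and returns them sorted.
import Mathlib
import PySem

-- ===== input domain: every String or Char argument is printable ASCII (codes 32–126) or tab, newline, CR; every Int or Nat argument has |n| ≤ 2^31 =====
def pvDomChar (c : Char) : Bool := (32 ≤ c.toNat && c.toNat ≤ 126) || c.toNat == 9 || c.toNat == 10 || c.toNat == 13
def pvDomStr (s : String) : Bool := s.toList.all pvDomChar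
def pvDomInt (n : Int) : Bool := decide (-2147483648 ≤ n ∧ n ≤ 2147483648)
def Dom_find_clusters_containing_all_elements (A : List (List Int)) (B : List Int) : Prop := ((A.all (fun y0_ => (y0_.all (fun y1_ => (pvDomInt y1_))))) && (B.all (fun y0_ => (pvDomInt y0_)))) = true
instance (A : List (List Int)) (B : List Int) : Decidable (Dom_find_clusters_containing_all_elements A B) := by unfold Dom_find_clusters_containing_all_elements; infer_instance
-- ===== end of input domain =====

-- B replaces A's per-cluster scan over B with an inverted index (element -> set of cluster indices) plus a sorted union: an asymptotically faster algorithm with the same return value.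


-- ===== PORT A =====
-- for idx, cluster in enumerate(A): for pointId in B: if pointId in cluster: append(idx); break
-- (the inner loop with break appends idx iff some element of B is in the cluster = B.any)
def find_clusters_containing_all_elements (A : List (List Int)) (B : List Int) : List Int :=
  (PySem.List.enumerate A 0).foldl
    (fun acc pr => if B.any (fun p => pr.2.contains p) then acc ++ [pr.1] else acc) []

-- ===== PORT B =====
-- index.setdefault(pointId, set()).add(idx)  =  index[pointId] = index.get(pointId, set()) ∪ {idx}  = Dict.modify
def pvInvIndex (A : List (List Int)) : PySem.Dict Int (PySem.Set Int) :=
  (PySem.List.enumerate A 0).foldl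
    (fun d pr => pr.2.foldl
      (fun d p => d.modify p PySem.Set.empty (fun s => PySem.Set.add s pr.1)) d)
    PySem.Dict.empty

def find_clusters_containing_all_elements_alt (A : List (List Int)) (B : List Int) : List Int :=
  let index := pvInvIndex A
  let hits := B.foldl (fun r p => PySem.Set.union r (index.getD p PySem.Set.empty)) PySem.Set.empty
  PySem.List.sorted hits (fun x => x) false

-- ===== PRECONDITION & SPEC =====
def Spec_find_clusters_containing_all_elements (A : List (List Int)) (B : List Int) (out : List Int) : Prop := out = find_clusters_containing_all_elements_alt A B
instance (A : List (List Int)) (B : List Int) (out : List Int) : Decidable (Spec_find_clusters_containing_all_elements A B out) := by unfold Spec_find_clusters_containing_all_elements; infer_instance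

-- ===== CLAIM (what is proved, stated in full; the proofs are below) =====
def Claim_equal_find_clusters_containing_all_elements : Prop := ∀ (A : List (List Int)) (B : List Int), Dom_find_clusters_containing_all_elements A B → Spec_find_clusters_containing_all_elements A B (find_clusters_containing_all_elements A B)

-- ===== LEMMAS AND PROOFS =====

-- A's loop is the filter of enumerate, projected to indices
theorem pvA_foldl_char (B : List Int) (l : List (Int × List Int)) (acc : List Int) :
    l.foldl (fun acc pr => if B.any (fun p => pr.2.contains p) then acc ++ [pr.1] else acc) acc
      = acc ++ (l.filter (fun pr => B.any (fun p => pr.2.contains p))).map (·.1) := by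
  induction l generalizing acc with
  | nil => simp
  | cons pr l ih =>
    rw [List.foldl_cons, List.filter_cons]
    by_cases h : (B.any (fun p => pr.2.contains p)) = true
    · rw [if_pos h, if_pos h, ih, List.map_cons]
      simp
    · rw [if_neg h, if_neg h, ih]

-- inner loop over a cluster: every key of the cluster gets idx added
theorem pvInner_getD (c : List Int) (i : Int) (d : PySem.Dict Int (PySem.Set Int)) (q : Int) :
    (c.foldl (fun d p => d.modify p PySem.Set.empty (fun s => PySem.Set.add s i)) d).getD q PySem.Set.empty
      = if q ∈ c then PySem.Set.add (d.getD q PySem.Set.empty) i else d.getD q PySem.Set.empty := by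
  induction c generalizing d with
  | nil => simp
  | cons p c ih =>
    simp only [List.foldl_cons, ih, PySem.Dict.getD_modify, List.mem_cons]
    by_cases hq : q = p
    · subst hq
      by_cases hc : q ∈ c <;> simp [hc]
    · by_cases hc : q ∈ c <;> simp [hq, hc]

theorem pvInvIndex_aux_mem (A : List (List Int)) (s : Int)
    (d : PySem.Dict Int (PySem.Set Int)) (q i : Int) :
    (i ∈ ((PySem.List.enumerate A s).foldl
        (fun d pr => pr.2.foldl
          (fun d p => d.modify p PySem.Set.empty (fun s => PySem.Set.add s pr.1)) d) d).getD q PySem.Set.empty)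
      ↔ i ∈ d.getD q PySem.Set.empty ∨ ∃ k : Nat, ∃ h : k < A.length, i = s + k ∧ q ∈ A[k] := by
  induction A generalizing s d with
  | nil => simp [PySem.List.enumerate_nil]
  | cons c A ih =>
    rw [PySem.List.enumerate_cons]
    simp only [List.foldl_cons]
    rw [ih]
    rw [pvInner_getD]
    constructor
    · rintro (h | ⟨k, hk, rfl, hq⟩)
      · by_cases hc : q ∈ c
        · simp only [hc, if_true, PySem.Set.mem_add] at h
          rcases h with h | rfl
          · exact Or.inl h
          · exact Or.inr ⟨0, by simp, by simp, by simpa⟩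
        · simp only [hc, if_false] at h
          exact Or.inl h
      · refine Or.inr ⟨k + 1, by simp only [List.length_cons]; omega, by push_cast; ring_nf, by simpa using hq⟩
    · rintro (h | ⟨k, hk, rfl, hq⟩)
      · left
        split_ifs with hc
        · exact (PySem.Set.mem_add _ _ _).mpr (Or.inl h)
        · exact h
      · cases k with
        | zero =>
          left
          simp only [List.length_cons] at hk
          simp only [List.getElem_cons_zero] at hq
          simp [hq, PySem.Set.mem_add]
        | succ k =>
          right
          refine ⟨k, by simpa using hk, by push_cast; ring_nf, by simpa using hq⟩

theorem pvInvIndex_mem (A : List (List Int)) (q i : Int) :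
    i ∈ (pvInvIndex A).getD q PySem.Set.empty
      ↔ ∃ k : Nat, ∃ h : k < A.length, i = (k : Int) ∧ q ∈ A[k] := by
  unfold pvInvIndex
  rw [pvInvIndex_aux_mem]
  simp [PySem.Set.empty, PySem.Dict.getD_empty]

theorem pvHits_mem (index : PySem.Dict Int (PySem.Set Int)) (B : List Int) (r : PySem.Set Int) (i : Int) :
    (i ∈ B.foldl (fun r p => PySem.Set.union r (index.getD p PySem.Set.empty)) r)
      ↔ i ∈ r ∨ ∃ p ∈ B, i ∈ index.getD p PySem.Set.empty := by
  induction B generalizing r with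
  | nil => simp
  | cons p B ih =>
    simp only [List.foldl_cons, ih, PySem.Set.mem_union, List.mem_cons]
    constructor
    · rintro ((h | h) | ⟨p', hp', h⟩)
      · exact Or.inl h
      · exact Or.inr ⟨p, Or.inl rfl, h⟩
      · exact Or.inr ⟨p', Or.inr hp', h⟩
    · rintro (h | ⟨p', (rfl | hp'), h⟩)
      · exact Or.inl (Or.inl h)
      · exact Or.inl (Or.inr h)
      · exact Or.inr ⟨p', hp', h⟩

theorem pvHits_nodup (index : PySem.Dict Int (PySem.Set Int)) (B : List Int) (r : PySem.Set Int)
    (hr : r.Nodup) :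
    (B.foldl (fun r p => PySem.Set.union r (index.getD p PySem.Set.empty)) r).Nodup := by
  induction B generalizing r with
  | nil => exact hr
  | cons p B ih => exact ih _ (PySem.Set.nodup_union _ _ hr)

-- ===== VERDICT (by name: the statement is the Claim_ definition above) =====
theorem find_clusters_containing_all_elements_spec : Claim_equal_find_clusters_containing_all_elements := by
  intro A B _
  unfold Spec_find_clusters_containing_all_elements
  unfold find_clusters_containing_all_elements find_clusters_containing_all_elements_alt
  simp only []
  set hits := B.foldl (fun r p => PySem.Set.union r ((pvInvIndex A).getD p PySem.Set.empty)) PySem.Set.empty with hhits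
  rw [pvA_foldl_char]
  set out := ((PySem.List.enumerate A 0).filter (fun pr => B.any (fun p => pr.2.contains p))).map (·.1) with hout
  rw [List.nil_append]
  -- out is strictly increasing
  have hpw : out.Pairwise (· < ·) := by
    rw [hout]
    rw [List.pairwise_map]
    exact (PySem.List.pairwise_lt_enumerate A 0).filter _
  -- out and hits have the same members
  have hmem : ∀ i : Int, i ∈ out ↔ i ∈ hits := by
    intro i
    rw [hout, hhits, pvHits_mem]
    simp only [List.mem_map, List.mem_filter, PySem.List.mem_enumerate_iff]
    constructor
    · rintro ⟨⟨j, c⟩, ⟨⟨k, hk, heq⟩, hany⟩, rfl⟩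
      obtain ⟨rfl, rfl⟩ := heq
      simp only [List.any_eq_true] at hany
      obtain ⟨p, hpB, hpc⟩ := hany
      exact Or.inr ⟨p, hpB, by
        simpa using (pvInvIndex_mem A p (k : Int)).mpr ⟨k, hk, rfl, by simpa using hpc⟩⟩
    · rintro (h | ⟨p, hpB, hpi⟩)
      · simp at h
      · obtain ⟨k, hk, rfl, hpc⟩ := (pvInvIndex_mem A p i).mp hpi
        refine ⟨((k : Int), A[k]), ⟨⟨k, hk, by simp⟩, ?_⟩, rfl⟩
        simp only [List.any_eq_true]
        exact ⟨p, hpB, by simpa using hpc⟩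
  have hperm : out.Perm hits := by
    rw [List.perm_ext_iff_of_nodup (hpw.imp (fun h => ne_of_lt h))
      (pvHits_nodup _ _ _ (by simp [PySem.Set.empty]))]
    exact hmem
  exact (PySem.List.sorted_eq_of_perm_of_pairwise_lt hits out (fun x => x) hperm hpw).symm
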